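-- pv_equiv track=rewrite | github.com/neyr0mant/advent_of_code | 2018/Task5/solution.py | solve_p1
-- ===== SOURCE A (Python) =====
-- def solve_p1(str_in):
--     letter_out = []
--     for letter in str_in:
--         if letter_out:
--             conditions = [letter.lower() == letter_out[-1].lower(),
--                           ((letter.isupper() and letter_out[-1].islower())
--                            or (letter.islower() and letter_out[-1].isupper()))]
--             if all(conditions):
--                 letter_out = letter_out[:-1]
--                 continue
--         letter_out += letter
--     return len(letter_out)
-- ===== SOURCE B (Python) =====
-- def solve_p1(str_in):
--     s = list(str_in)
--     changed = True
--     while changed: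
--         changed = False
--         out = []
--         i = 0
--         while i < len(s):
--             if i + 1 < len(s) and s[i] != s[i + 1] and s[i].lower() == s[i + 1].lower():
--                 i += 2
--                 changed = True
--             else:
--                 out.append(s[i])
--                 i += 1
--         s = out
--     return len(s)
-- ===== Notes on version B (the rewrite author's own statement) =====
-- stated objective: alternative
-- what changed: Replaces A's single left-to-right pass with a slice-copied stack by repeated fixpoint sweeps: each sweep scans the string once deleting disjoint adjacent reacting pairs, repeating until no pair remains (no stack at all); equivalence rests on the confluence of the pair-deletion rewriting.
import Mathlib
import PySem

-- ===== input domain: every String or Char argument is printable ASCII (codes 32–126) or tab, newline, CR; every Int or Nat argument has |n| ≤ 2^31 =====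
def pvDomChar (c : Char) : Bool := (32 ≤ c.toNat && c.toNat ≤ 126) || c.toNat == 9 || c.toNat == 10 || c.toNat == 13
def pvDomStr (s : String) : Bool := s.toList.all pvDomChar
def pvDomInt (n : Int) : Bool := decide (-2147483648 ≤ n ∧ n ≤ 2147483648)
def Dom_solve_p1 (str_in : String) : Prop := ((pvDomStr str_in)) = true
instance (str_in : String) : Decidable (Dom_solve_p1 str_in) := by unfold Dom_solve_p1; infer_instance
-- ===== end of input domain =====

-- B replaces A's single stack pass (with its slice-copy per reaction) by repeated whole-string
-- sweeps deleting disjoint adjacent reacting pairs until a sweep removes nothing; objective: alternative.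

-- ===== PORT A =====
-- one loop iteration of A: guard 'if letter_out:', the two conditions, slice copy or append
def pvStepA (letter_out : List Char) (letter : Char) : List Char :=
  if letter_out ≠ [] then
    let last := PySem.List.pyGetD letter_out (-1) letter   -- letter_out[-1], in range by the guard
    let conditions : List Bool :=
      [PySem.Chars.lowerChar letter == PySem.Chars.lowerChar last,
       ((PySem.Chars.isupper letter && PySem.Chars.islower last)
        || (PySem.Chars.islower letter && PySem.Chars.isupper last))]
    if conditions.all id then PySem.List.slice letter_out none (some (-1))
    else letter_out ++ [letter]
  else letter_out ++ [letter]

def solve_p1 (str_in : String) : Int :=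
  PySem.List.len (str_in.toList.foldl pvStepA [])

-- ===== PORT B =====
-- inner while loop of B: one left-to-right sweep, deleting disjoint adjacent reacting pairs;
-- returns the surviving characters and whether anything was deleted
def pvPass : List Char → List Char × Bool
  | [] => ([], false)
  | [a] => ([a], false)
  | a :: d :: rest =>
    if a ≠ d ∧ PySem.Chars.lowerChar a = PySem.Chars.lowerChar d then
      ((pvPass rest).1, true)
    else
      (a :: (pvPass (d :: rest)).1, (pvPass (d :: rest)).2)

-- termination measure of the outer while loop (cited by pvLoop's decreasing_by)
lemma pvPass_len (s : List Char) :
    (pvPass s).1.length ≤ s.length ∧ ((pvPass s).2 = true → (pvPass s).1.length < s.length) := by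
  induction s using pvPass.induct with
  | case1 => simp [pvPass]
  | case2 a => simp [pvPass]
  | case3 a d rest h ih =>
      simp only [pvPass, if_pos h]
      exact ⟨by have := ih.1; simp; omega, fun _ => by have := ih.1; simp; omega⟩
  | case4 a d rest h ih =>
      simp only [pvPass, if_neg h]
      exact ⟨by have := ih.1; simpa using Nat.succ_le_succ this,
             fun hc => by have := ih.2 hc; simpa using Nat.succ_lt_succ this⟩

-- outer while loop of B: sweep until a sweep deletes nothing
def pvLoop (s : List Char) : List Char :=
  if h : (pvPass s).2 = true then pvLoop (pvPass s).1 else (pvPass s).1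
termination_by s.length
decreasing_by exact (pvPass_len s).2 h

def solve_p1_alt (str_in : String) : Int :=
  ((pvLoop str_in.toList).length : Int)

-- ===== PRECONDITION & SPEC =====
def Spec_solve_p1 (str_in : String) (out : Int) : Prop := out = solve_p1_alt str_in
instance (str_in : String) (out : Int) : Decidable (Spec_solve_p1 str_in out) := by unfold Spec_solve_p1; infer_instance

-- ===== CLAIM (what is proved, stated in full; the proofs are below) =====
def Claim_equal_solve_p1 : Prop := ∀ (str_in : String), Dom_solve_p1 str_in → Spec_solve_p1 str_in (solve_p1 str_in)

-- ===== LEMMAS AND PROOFS =====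

-- the reaction relation: different characters, equal lowercased
def pvR (x y : Char) : Prop := x ≠ y ∧ PySem.Chars.lowerChar x = PySem.Chars.lowerChar y

lemma pv_R_symm {x y : Char} (h : pvR x y) : pvR y x := ⟨h.1.symm, h.2.symm⟩

-- clean form of A's loop body (stack step)
def pvStepL (stack : List Char) (c : Char) : List Char :=
  match stack.getLast? with
  | some t =>
      if c ≠ t ∧ PySem.Chars.lowerChar c = PySem.Chars.lowerChar t then stack.dropLast
      else stack ++ [c]
  | none => stack ++ [c]

lemma pv_getLast?_none {st : List Char} (h : st.getLast? = none) : st = [] := by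
  cases st with
  | nil => rfl
  | cons x xs => simp [List.getLast?_eq_some_getLast] at h

lemma pvStepL_nil (c : Char) : pvStepL [] c = [c] := rfl

lemma pvStepL_pop {st : List Char} {t c : Char} (h : st.getLast? = some t) (hr : pvR c t) :
    pvStepL st c = st.dropLast := by
  unfold pvStepL; rw [h]; exact if_pos hr

lemma pvStepL_push {st : List Char} {t c : Char} (h : st.getLast? = some t) (hr : ¬ pvR c t) :
    pvStepL st c = st ++ [c] := by
  unfold pvStepL; rw [h]; exact if_neg hr

-- a list with no adjacent reacting pair
def pvIrred (l : List Char) : Prop := List.IsChain (fun x y => ¬ pvR x y) l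

lemma pv_upper_bounds (c : Char) (hc : PySem.Chars.isupper c = true) : 65 ≤ c.toNat ∧ c.toNat ≤ 90 := by
  simp only [PySem.Chars.isupper, Bool.and_eq_true, decide_eq_true_eq, Char.le_def,
    UInt32.le_iff_toNat_le] at hc
  exact hc

lemma pv_lower_bounds (c : Char) (hc : PySem.Chars.islower c = true) : 97 ≤ c.toNat ∧ c.toNat ≤ 122 := by
  simp only [PySem.Chars.islower, Bool.and_eq_true, decide_eq_true_eq, Char.le_def,
    UInt32.le_iff_toNat_le] at hc
  exact hc

lemma pv_isupper_iff (c : Char) : PySem.Chars.isupper c = true ↔ (65 ≤ c.toNat ∧ c.toNat ≤ 90) := by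
  simp only [PySem.Chars.isupper, Bool.and_eq_true, decide_eq_true_eq, Char.le_def,
    UInt32.le_iff_toNat_le]
  exact Iff.rfl

lemma pv_char_eq_of_toNat_eq (c t : Char) (h : c.toNat = t.toNat) : c = t :=
  Char.ext (UInt32.toNat_inj.mp h)

lemma pv_toNat_lowerChar_upper (c : Char) (hc : PySem.Chars.isupper c = true) :
    (PySem.Chars.lowerChar c).toNat = c.toNat + 32 := by
  have h := pv_upper_bounds c hc
  simp only [PySem.Chars.lowerChar, hc, if_true, Char.toNat_ofNat]
  rw [if_pos]
  exact Or.inl (by omega)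

lemma pv_lower_toNat (c : Char) :
    (PySem.Chars.lowerChar c).toNat = if 65 ≤ c.toNat ∧ c.toNat ≤ 90 then c.toNat + 32 else c.toNat := by
  by_cases hu : PySem.Chars.isupper c = true
  · rw [if_pos ((pv_isupper_iff c).mp hu)]
    exact pv_toNat_lowerChar_upper c hu
  · rw [if_neg (fun hb => hu ((pv_isupper_iff c).mpr hb))]
    simp [PySem.Chars.lowerChar, hu]

lemma pv_islower_lowerChar_upper (c : Char) (hc : PySem.Chars.isupper c = true) :
    PySem.Chars.islower (PySem.Chars.lowerChar c) = true := by
  have h := pv_upper_bounds c hc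
  have h2 := pv_toNat_lowerChar_upper c hc
  simp only [PySem.Chars.islower, Bool.and_eq_true, decide_eq_true_eq, Char.le_def,
    UInt32.le_iff_toNat_le]
  have hv : (PySem.Chars.lowerChar c).val.toNat = (PySem.Chars.lowerChar c).toNat := rfl
  constructor <;> simp only [show ('a':Char).val.toNat = 97 from rfl,
    show ('z':Char).val.toNat = 122 from rfl, hv] <;> omega

-- the reacting partner of a character is unique
lemma pv_partner_unique {p q r : Char} (h1 : pvR p r) (h2 : pvR q r) : p = q := by
  obtain ⟨hp, hpl⟩ := h1
  obtain ⟨hq, hql⟩ := h2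
  have hp' : p.toNat ≠ r.toNat := fun h => hp (pv_char_eq_of_toNat_eq p r h)
  have hq' : q.toNat ≠ r.toNat := fun h => hq (pv_char_eq_of_toNat_eq q r h)
  have e1 := congrArg Char.toNat hpl
  have e2 := congrArg Char.toNat hql
  rw [pv_lower_toNat, pv_lower_toNat] at e1
  rw [pv_lower_toNat, pv_lower_toNat] at e2
  apply pv_char_eq_of_toNat_eq
  split_ifs at e1 e2 <;> omega

-- A's pair test (same letter ignoring case AND opposite cases) equals the plain reaction test
lemma pv_condEquiv (c t : Char) :
    ((PySem.Chars.lowerChar c == PySem.Chars.lowerChar t)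
      && ((PySem.Chars.isupper c && PySem.Chars.islower t)
          || (PySem.Chars.islower c && PySem.Chars.isupper t))) = true
    ↔ (c ≠ t ∧ PySem.Chars.lowerChar c = PySem.Chars.lowerChar t) := by
  simp only [Bool.and_eq_true, Bool.or_eq_true, beq_iff_eq]
  constructor
  · rintro ⟨heq, ⟨hcu, htl⟩ | ⟨hcl, htu⟩⟩
    · refine ⟨?_, heq⟩
      have := pv_upper_bounds c hcu; have := pv_lower_bounds t htl
      intro h; subst h; omega
    · refine ⟨?_, heq⟩
      have := pv_lower_bounds c hcl; have := pv_upper_bounds t htu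
      intro h; subst h; omega
  · rintro ⟨hne, heq⟩
    refine ⟨heq, ?_⟩
    by_cases hcu : PySem.Chars.isupper c = true
      <;> by_cases htu : PySem.Chars.isupper t = true
    · exfalso
      have h1 := pv_toNat_lowerChar_upper c hcu
      have h2 := pv_toNat_lowerChar_upper t htu
      rw [heq] at h1
      exact hne (pv_char_eq_of_toNat_eq c t (by omega))
    · left
      refine ⟨hcu, ?_⟩
      have h1 := pv_islower_lowerChar_upper c hcu
      rw [heq] at h1
      simpa [PySem.Chars.lowerChar, htu] using h1
    · right
      refine ⟨?_, htu⟩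
      have h1 := pv_islower_lowerChar_upper t htu
      rw [← heq] at h1
      simpa [PySem.Chars.lowerChar, hcu] using h1
    · exfalso
      apply hne
      have h1 : PySem.Chars.lowerChar c = c := by simp [PySem.Chars.lowerChar, hcu]
      have h2 : PySem.Chars.lowerChar t = t := by simp [PySem.Chars.lowerChar, htu]
      rw [h1, h2] at heq; exact heq

-- A's loop body is the clean stack step
lemma pv_step_eq (acc : List Char) (c : Char) : pvStepA acc c = pvStepL acc c := by
  cases h : acc.getLast? with
  | none =>
      have : acc = [] := pv_getLast?_none h
      subst this
      simp [pvStepA, pvStepL]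
  | some t =>
      have hne : acc ≠ [] := by intro h'; subst h'; simp at h
      have hlast : acc.getLast hne = t := by
        rw [List.getLast?_eq_some_getLast (h := hne)] at h; exact Option.some.inj h
      have hget : PySem.List.pyGetD acc (-1) c = t :=
        (PySem.List.pyGetD_neg_one acc c hne).trans hlast
      unfold pvStepA pvStepL
      rw [if_pos hne, h]
      simp only [hget, List.all, id, Bool.and_true, PySem.List.slice_to_neg_one]
      by_cases hc : c ≠ t ∧ PySem.Chars.lowerChar c = PySem.Chars.lowerChar t
      · rw [if_pos ((pv_condEquiv c t).mpr hc), if_pos hc]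
      · rw [if_neg (fun hb => hc ((pv_condEquiv c t).mp hb)), if_neg hc]

-- decompose irreducibility of st ++ [t]
lemma pv_irred_concat {st : List Char} {t : Char} (h : pvIrred (st ++ [t])) :
    pvIrred st ∧ (∀ y, st.getLast? = some y → ¬ pvR y t) := by
  rw [pvIrred, List.isChain_append] at h
  exact ⟨h.1, fun y hy => h.2.2 y hy t rfl⟩

lemma pv_irred_concat' {st : List Char} {t : Char}
    (h1 : pvIrred st) (h2 : ∀ y, st.getLast? = some y → ¬ pvR y t) :
    pvIrred (st ++ [t]) := by
  rw [pvIrred, List.isChain_append]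
  exact ⟨h1, List.isChain_singleton t, fun y hy z hz => by
    simp only [List.head?_cons, Option.mem_def, Option.some.injEq] at hz
    subst hz; exact h2 y hy⟩

lemma pv_split_getLast {st : List Char} {t : Char} (h : st.getLast? = some t) :
    st.dropLast ++ [t] = st := by
  have hne : st ≠ [] := by intro h'; subst h'; simp at h
  have hlast : st.getLast hne = t := by
    rw [List.getLast?_eq_some_getLast (h := hne)] at h; exact Option.some.inj h
  rw [← hlast]
  exact List.dropLast_append_getLast hne

lemma pv_irred_dropLast {st : List Char} (h : pvIrred st) : pvIrred st.dropLast := by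
  cases hl : st.getLast? with
  | none => rw [pv_getLast?_none hl]; exact List.isChain_nil
  | some t =>
      exact (pv_irred_concat (pv_split_getLast hl ▸ h)).1

-- the stack step preserves irreducibility
lemma pv_stepL_irred {st : List Char} (c : Char) (h : pvIrred st) : pvIrred (pvStepL st c) := by
  cases hl : st.getLast? with
  | none =>
      rw [pv_getLast?_none hl, pvStepL_nil]
      exact List.isChain_singleton c
  | some t =>
      by_cases hr : pvR c t
      · rw [pvStepL_pop hl hr]
        exact pv_irred_dropLast h
      · rw [pvStepL_push hl hr]
        exact pv_irred_concat' h (fun y hy => by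
          rw [hl] at hy
          injection hy with hy; subst hy
          exact fun hr' => hr (pv_R_symm hr'))

-- pushing a reacting pair onto an irreducible stack is a no-op
lemma pv_cancel {st : List Char} {a d : Char} (hst : pvIrred st) (had : pvR a d) :
    pvStepL (pvStepL st a) d = st := by
  cases hl : st.getLast? with
  | none =>
      rw [pv_getLast?_none hl, pvStepL_nil,
        pvStepL_pop (t := a) (by rfl) (pv_R_symm had)]
      rfl
  | some x =>
      have hsplit : st.dropLast ++ [x] = st := pv_split_getLast hl
      by_cases hax : pvR a x
      · -- a reacts with the top x; by uniqueness x = d, pop then re-push d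
        have hxd : x = d := pv_partner_unique (pv_R_symm hax) (pv_R_symm had)
        rw [pvStepL_pop hl hax]
        have hjunction := (pv_irred_concat (st := st.dropLast) (t := x) (by rw [hsplit]; exact hst)).2
        cases hl2 : st.dropLast.getLast? with
        | none =>
            rw [pv_getLast?_none hl2] at hsplit
            rw [pv_getLast?_none hl2, pvStepL_nil, ← hxd]
            simpa using hsplit
        | some y =>
            rw [pvStepL_push hl2 (fun hr => hjunction y hl2 (hxd.symm ▸ pv_R_symm hr)), ← hxd]
            exact hsplit
      · -- a does not react with the top: push a, then d pops it
        rw [pvStepL_push hl hax,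
          pvStepL_pop (t := a) (List.getLast?_concat) (pv_R_symm had)]
        simp

-- one sweep does not change the stack reduction
lemma pv_pass_invariant (s : List Char) :
    ∀ st, pvIrred st → List.foldl pvStepL st (pvPass s).1 = List.foldl pvStepL st s := by
  induction s using pvPass.induct with
  | case1 => intro st _; simp [pvPass]
  | case2 a => intro st _; simp [pvPass]
  | case3 a d rest h ih =>
      intro st hst
      simp only [pvPass, if_pos h, List.foldl_cons]
      rw [ih st hst, pv_cancel hst h]
  | case4 a d rest h ih =>
      intro st hst
      simp only [pvPass, if_neg h, List.foldl_cons]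
      exact ih (pvStepL st a) (pv_stepL_irred a hst)

-- an unchanged sweep means the string was already irreducible
lemma pv_pass_fixed (s : List Char) :
    (pvPass s).2 = false → (pvPass s).1 = s ∧ pvIrred s := by
  induction s using pvPass.induct with
  | case1 => intro _; exact ⟨rfl, List.isChain_nil⟩
  | case2 a => intro _; exact ⟨rfl, List.isChain_singleton a⟩
  | case3 a d rest h ih =>
      intro hc
      simp [pvPass, if_pos h] at hc
  | case4 a d rest h ih =>
      intro hc
      simp only [pvPass, if_neg h] at hc ⊢
      obtain ⟨h1, h2⟩ := ih hc
      exact ⟨by rw [h1], List.isChain_cons_cons.mpr ⟨h, h2⟩⟩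

-- folding an irreducible string just appends it
lemma pv_fold_of_irred (s : List Char) :
    ∀ st, pvIrred (st ++ s) → List.foldl pvStepL st s = st ++ s := by
  induction s with
  | nil => intro st _; simp
  | cons c s ih =>
      intro st h
      have hjun : ∀ y, st.getLast? = some y → ¬ pvR y c := by
        intro y hy
        exact (List.isChain_append.mp h).2.2 y hy c (by simp)
      have hstep : pvStepL st c = st ++ [c] := by
        cases hl : st.getLast? with
        | none => rw [pv_getLast?_none hl, pvStepL_nil]; rfl
        | some t => exact pvStepL_push hl (fun hr => hjun t hl (pv_R_symm hr))
      rw [List.foldl_cons, hstep, ih (st ++ [c]) (by simpa using h), List.append_assoc]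
      rfl

-- the sweep loop computes exactly the stack reduction
lemma pv_loop_eq (s : List Char) : pvLoop s = List.foldl pvStepL [] s := by
  induction s using pvLoop.induct with
  | case1 s h ih =>
      rw [pvLoop, dif_pos h, ih, pv_pass_invariant s [] List.isChain_nil]
  | case2 s h =>
      obtain ⟨h1, h2⟩ := pv_pass_fixed s (by simpa using h)
      rw [pvLoop, dif_neg h, h1]
      rw [pv_fold_of_irred s [] (by simpa using h2)]
      rfl

-- ===== VERDICT (by name: the statement is the Claim_ definition above) =====
theorem solve_p1_spec : Claim_equal_solve_p1 := by
  intro s _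
  unfold Spec_solve_p1 solve_p1 solve_p1_alt
  rw [PySem.List.len_eq, pv_loop_eq]
  have hstep : pvStepA = pvStepL := funext fun a => funext fun c => pv_step_eq a c
  rw [hstep]
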